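/- GENERATED by tools/from_farm_form.py from prooffarm-gif/accepted/openbsd_reallocarray/Proof.lean (a worked proof of the farm's unit `openbsd_reallocarray`,
   accepted by the verdict) — do not edit. -/
import Gif.Spec.Units.openbsd_reallocarray
import Gif.Spec.AllSegs

/-!
  `openbsd_reallocarray` (0x107760, 34 instructions; openbsd-reallocarray.c:19-73) satisfies its HEAP-LEVEL contract, from the
  contract of `realloc`:

      entry ── nmemb > 0xffffffff || size > 0xffffffff ? ─ (no: both factors are below 2^32) ─┐
               (yes: DEAD — would do `mul`, `jo`, the store of `errno`)                         │
      0x107790 ── size == 0 || nmemb == 0 ? ─ (no: both factors are at least 1) ─ sub rsp, 8 ─ imul ─ realloc(optr, nmemb · size)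
               (yes: DEAD — `return NULL`)                                   ─ ret1 ─ add rsp, 8 ─ ret

  The walker does not prune the two `setcc ; setcc ; or ; jcc` tests: the dead arms are closed by hand from their branch facts
  (`Gif.Spec.setcc_or_zero`, `setcc_or_ne_zero`). The 64-bit product is exact (both factors are below 2^32). The post is `realloc`'s,
  seen from 16 bytes further up the stack (`AllocPost.wrap`, `ReallocPost.wrap`).
-/

namespace Gif.Spec.openbsd_reallocarray
open X86 X86.User Asan ProgX.Base ProgX.Base.Spec Gif.Spec

/-- 0x107776 (openbsd-reallocarray.c:22): the arm `nmemb >= MUL_NO_OVERFLOW || size >= MUL_NO_OVERFLOW` is dead when both factors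
are below 2^32. For the branch fact `hbr_107776` of the arm that falls through. -/
theorem ora_big_dead {a b : Nat} (ha : a < 2 ^ 32) (hb : b < 2 ^ 32)
    (hbr : ¬ ((if 4294967295 < a then (1 : BitVec 8) else 0) ||| (if 4294967295 < b then 1 else 0)).toNat = 0) : False := by
  have hor := (setcc_or_ne_zero _ _).mp hbr
  omega

/-- 0x10779e (openbsd-reallocarray.c:69): the arm `size == 0 || nmemb == 0` is dead when both factors are at least 1. For the branch
fact `hbr_10779e` of the taken arm. -/
theorem ora_zero_dead {a b : Nat} (ha : 1 ≤ a) (hb : 1 ≤ b)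
    (hbr : ¬ ((if b = 0 then (1 : BitVec 8) else 0) ||| (if a = 0 then 1 else 0)).toNat = 0) : False := by
  have hor := (setcc_or_ne_zero _ _).mp hbr
  omega

/-- 0x1077a4 `imul rsi, rcx`: the 64-bit product of two factors below 2^32 is the product of the numbers. -/
theorem ora_prod_exact (a b : Word) (ha : a.toNat < 2 ^ 32) (hb : b.toNat < 2 ^ 32) :
    (a * b).toNat = a.toNat * b.toNat := by
  rw [UInt64.toNat_mul]
  apply Nat.mod_eq_of_lt
  have h1 : a.toNat * b.toNat < 2 ^ 32 * 2 ^ 32 := Nat.mul_lt_mul'' ha hb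
  have e64 : (2 : Nat) ^ 32 * 2 ^ 32 = 2 ^ 64 := by decide
  rw [e64] at h1
  exact h1

end Gif.Spec.openbsd_reallocarray

open X86 X86.User Asan ProgX.Base ProgX.Base.Spec Gif.Spec

set_option maxRecDepth 4000
set_option maxHeartbeats 4000000

/-- `openbsd_reallocarray` satisfies its contract: with both factors in [1, 2^32) neither early return is taken and the result is
`realloc(optr, nmemb · size)`'s. -/
theorem Gif.Spec.Proved.openbsd_reallocarray_ok : Gif.Spec.openbsd_reallocarray.Statement := by
  intro Lay hLay μ hμ u₀ hcode h_realloc H rest frames n c u ret he hpre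
  have hrealloc := h_realloc H rest frames n c
  v_entry he
  obtain ⟨hp, hsi1, hsi2, hdx1, hdx2, hcase⟩ := hpre
  have hok := hp.inv.heap
  have hbase := hp.base
  have hlimit := hp.limit
  have hroom := hok.room
  rw [hbase, hlimit] at hroom
  u_walk hcode [hμ.vendor] span [ProgX.Base.L.textLo, ProgX.Base.L.textHi] side (v_side)
  case call_inv =>
    v_inv
  case pre_1077a8 =>
    -- 0x1077a8 (openbsd-reallocarray.c:72): the precondition of `realloc(optr, nmemb * size)`
    have hun : ShadowUntouched u.mem s_1077a8.mem := by v_untouched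
    refine ⟨hp.callee hun ?_ ?_ ?_ ?_, ?_⟩
    · rw [hbase, hlimit, w_mem]
      u_eqon
    · rw [w_rsp]
      u_omega
    · rw [w_rsp]
      u_omega
    · rw [w_rsp]
      u_omega
    · rw [w_kept .rdi rfl]
      exact hcase
  case call_inv =>
    -- the overflow arm (0x107778 …): dead
    exact (Gif.Spec.openbsd_reallocarray.ora_big_dead hsi2 hdx2 hbr_107776).elim
  case pre_1077a8 =>
    exact (Gif.Spec.openbsd_reallocarray.ora_big_dead hsi2 hdx2 hbr_107776).elim
  case cont =>
    -- 0x1077ca (openbsd-reallocarray.c:70) `return NULL`: dead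
    exact (Gif.Spec.openbsd_reallocarray.ora_zero_dead hsi1 hdx1 hbr_10779e).elim
  case cont =>
    -- 0x1077ad (ret1): `realloc(optr, nmemb * size)` has returned; `add rsp, 8 ; ret`, the result passes through
    have hprod : (u.reg .rsi * u.reg .rdx).toNat = (u.reg .rsi).toNat * (u.reg .rdx).toNat :=
      Gif.Spec.openbsd_reallocarray.ora_prod_exact _ _ hsi2 hdx2
    obtain ⟨m, hm⟩ : ∃ m, (u.reg .rsi).toNat * (u.reg .rdx).toNat = m := ⟨_, rfl⟩
    rw [hm] at hprod
    have hn : (s_1077a8.reg .rsi).toNat = m := by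
      rw [w_rsi_1077a8]
      exact hprod
    have c_rdi : s_1077a8.reg .rdi = u.reg .rdi := w_kept_1077a8 .rdi rfl
    have hpost : ((u.reg .rdi).toNat = 0 → ProgX.Spec.AllocPost H rest frames 128 m (r16 m) s_1077a8 s_1077a8r) ∧
        ((u.reg .rdi).toNat ≠ 0 → ProgX.Spec.ReallocPost H rest frames 128 (u.reg .rdi).toNat n c m s_1077a8 s_1077a8r) := by
      have this : ((s_1077a8.reg .rdi).toNat = 0 →
            ProgX.Spec.AllocPost H rest frames 128 (s_1077a8.reg .rsi).toNat (r16 (s_1077a8.reg .rsi).toNat) s_1077a8 s_1077a8r) ∧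
          ((s_1077a8.reg .rdi).toNat ≠ 0 →
            ProgX.Spec.ReallocPost H rest frames 128 (s_1077a8.reg .rdi).toNat n c (s_1077a8.reg .rsi).toNat s_1077a8 s_1077a8r) :=
        w_post
      rw [hn, c_rdi] at this
      exact this
    clear w_post
    obtain ⟨rv, hrv⟩ : ∃ rv, s_1077a8r.reg .rax = rv := ⟨_, rfl⟩
    have hun : ShadowUntouched u.mem s_1077a8.mem := by
      rw [w_mem_1077a8]
      v_untouched
    have hstack : Mem.SameExcept [⟨(u.reg .rsp).toNat - 144, (u.reg .rsp).toNat⟩] u.mem s_1077a8.mem := by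
      rw [w_mem_1077a8]
      u_same
    have hle : (s_1077a8.reg .rsp).toNat ≤ (u.reg .rsp).toNat := by
      rw [w_rsp_1077a8]
      u_omega
    have hF : (u.reg .rsp).toNat - 144 ≤ (s_1077a8.reg .rsp).toNat - 128 := by
      rw [w_rsp_1077a8]
      u_omega
    -- where `optr` is: NULL, or inside the heap (the footprint of `realloc` has two windows at `optr`)
    have hpcase : (u.reg .rdi).toNat = 0 ∨
        (0x800040 ≤ (u.reg .rdi).toNat ∧ (u.reg .rdi).toNat + c + 32 ≤ 0xC00000) := by
      rcases hcase with h0 | hlc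
      · exact Or.inl h0
      · have hi := hok.obj_inside hlc
        have hr := hok.obj_range hlc
        simp only at hi hr
        rw [hbase] at hr
        exact Or.inr ⟨by omega, by omega⟩
    v_after_call w_rsp_1077a8 w_mem_1077a8
    simp only [shadowSpan, Heap.next_def, hbase, hn, c_rdi] at w_same
    have hq0 : UInt64.ofNat (s_1077a8r.mem.readLE (u.reg .rsp) 8) = ret := by
      u_frame he_retAddr
    u_walk hcode [hμ.vendor] span [ProgX.Base.L.textLo, ProgX.Base.L.textHi] side (v_side)
    refine ReachVia.done ?_
    v_returned
    · -- the post: `realloc`'s, seen from here (`ProgX.Spec.AllocPost.wrap`, `ProgX.Spec.ReallocPost.wrap`)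
      show (_ → ProgX.Spec.AllocPost H rest frames 144 ((u.reg .rsi).toNat * (u.reg .rdx).toNat)
          (r16 ((u.reg .rsi).toNat * (u.reg .rdx).toNat)) u _) ∧
        (_ → ProgX.Spec.ReallocPost H rest frames 144 _ n c ((u.reg .rsi).toNat * (u.reg .rdx).toNat) u _)
      rw [hm]
      have hrax : s_1077b1.reg .rax = s_1077a8r.reg .rax := by
        rw [w_rax, hrv]
      refine ⟨fun h0 => ?_, fun hne => ?_⟩
      · exact (hpost.1 h0).wrap hp hun hstack hle hF w_mem hrax
      · exact (hpost.2 hne).wrap hp (hcase.resolve_left hne) hun hstack hle hF w_mem hrax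
    · -- the footprint: `realloc`'s windows, 144 bytes of stack
      simp only [X86.User.Spec.footprint, vspec, shadowSpan, Heap.next_def, hbase, hm]
      u_same
  case cont =>
    exact (Gif.Spec.openbsd_reallocarray.ora_big_dead hsi2 hdx2 hbr_107776).elim
  case cont =>
    exact (Gif.Spec.openbsd_reallocarray.ora_big_dead hsi2 hdx2 hbr_107776).elim
  case cont =>
    exact (Gif.Spec.openbsd_reallocarray.ora_big_dead hsi2 hdx2 hbr_107776).elim
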